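-- pv_equiv track=rewrite | github.com/ka4erga1/learning | 26.py | find_minimal_substring
-- ===== SOURCE A (Python) =====
-- def find_minimal_substring(s, c):
--
--     shortest_length = len(s) + 1
--
--     for i in range(len(s)):
--         for j in range(i, len(s) + 1):
--             substring_char_set = set(s[i:j])
--
--             if substring_char_set == set(c):
--                 length = j - i
--                 if length < shortest_length:
--                     shortest_length = length
--
--     return shortest_length if shortest_length != len(s) + 1 else 0
-- ===== SOURCE B (Python) =====
-- def find_minimal_substring(s, c):
--     need = set(c)
--     if not need:
--         return 0
--     best = None
--     n = len(s)
--     for i in range(n):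
--         cur = set()
--         for j in range(i, n):
--             ch = s[j]
--             if ch not in need:
--                 break
--             cur.add(ch)
--             if cur == need:
--                 d = j - i + 1
--                 if best is None or d < best:
--                     best = d
--                 break
--     return best if best is not None else 0
-- ===== Notes on version B (the rewrite author's own statement) =====
-- stated objective: faster
-- what changed: A rebuilds set(s[i:j]) for every substring pair (i,j); B does, for each start i, a single incremental forward scan that grows a character set and stops at the first window whose set equals set(c) or at the first disallowed character.
import Mathlib
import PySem

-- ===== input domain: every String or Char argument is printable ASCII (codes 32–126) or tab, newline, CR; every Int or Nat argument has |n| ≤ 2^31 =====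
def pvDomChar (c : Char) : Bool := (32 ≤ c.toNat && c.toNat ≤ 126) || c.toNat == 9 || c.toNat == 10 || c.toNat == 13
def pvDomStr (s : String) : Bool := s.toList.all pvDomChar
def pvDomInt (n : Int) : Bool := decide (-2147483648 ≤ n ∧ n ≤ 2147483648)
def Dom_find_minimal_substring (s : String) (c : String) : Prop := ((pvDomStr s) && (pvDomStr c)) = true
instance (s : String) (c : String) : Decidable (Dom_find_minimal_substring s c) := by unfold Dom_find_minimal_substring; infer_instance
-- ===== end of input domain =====

-- B replaces A's all-substrings scan (rebuilding a set per substring) by, per start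
-- index, one incremental scan that grows a character set and stops at the first
-- match or first disallowed character (objective: faster).

-- ===== PORT A =====
def find_minimal_substring (s : String) (c : String) : Int :=
  let t := s.toList
  let n : Int := (t.length : Int)
  let shortest : Int :=
    (PySem.List.pyRange 0 n 1).foldl (fun shortest i =>
      (PySem.List.pyRange i (n + 1) 1).foldl (fun shortest j =>
        if PySem.Set.equal (PySem.Set.ofList (PySem.List.slice t (some i) (some j)))
            (PySem.Set.ofList c.toList) then
          (if j - i < shortest then j - i else shortest)
        else shortest) shortest) (n + 1)
  if shortest ≠ n + 1 then shortest else 0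

-- ===== PORT B =====
-- inner loop of Source B: scan forward from a start, growing the set `cur`;
-- return the length of the first window whose set equals `need`, none on a
-- disallowed character or end of string (the two `break`s).
def pvBInner (need : PySem.Set Char) (cur : PySem.Set Char) (rest : List Char) (len : Nat) :
    Option Nat :=
  match rest with
  | [] => none
  | ch :: rest' =>
    if PySem.Set.contains need ch then
      let cur' := PySem.Set.add cur ch
      if PySem.Set.equal cur' need then some (len + 1)
      else pvBInner need cur' rest' (len + 1)
    else none

def find_minimal_substring_alt (s : String) (c : String) : Int :=
  let need := PySem.Set.ofList c.toList
  if need.isEmpty then 0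
  else
    let t := s.toList
    let n := t.length
    let best : Option Nat :=
      (List.range n).foldl (fun best i =>
        match pvBInner need PySem.Set.empty (t.drop i) 0 with
        | none => best
        | some d =>
          match best with
          | none => some d
          | some b => if d < b then some d else best) none
    match best with
    | none => 0
    | some d => (d : Int)

-- ===== PRECONDITION & SPEC =====
def Spec_find_minimal_substring (s : String) (c : String) (out : Int) : Prop := out = find_minimal_substring_alt s c
instance (s : String) (c : String) (out : Int) : Decidable (Spec_find_minimal_substring s c out) := by unfold Spec_find_minimal_substring; infer_instance

-- ===== CLAIM (what is proved, stated in full; the proofs are below) =====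
def Claim_equal_find_minimal_substring : Prop := ∀ (s : String) (c : String), Dom_find_minimal_substring s c → Spec_find_minimal_substring s c (find_minimal_substring s c)

-- ===== LEMMAS AND PROOFS =====

-- `cur` after absorbing a prefix, written as a fold (matches Set.ofList_eq_foldl)
def pvAddAll (cur : PySem.Set Char) (l : List Char) : PySem.Set Char :=
  l.foldl PySem.Set.add cur

-- pyRange over consecutive ints as a mapped List.range
lemma pvRange_cast (a m : Nat) :
    PySem.List.pyRange (a : Int) (((a + m : Nat) : Int)) 1
      = (List.range m).map (fun k => ((a + k : Nat) : Int)) := by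
  induction m with
  | zero => simp [PySem.List.pyRange]
  | succ m ih =>
    have h1 : ((a + (m+1) : Nat) : Int) = ((a + m : Nat) : Int) + 1 := by push_cast; ring
    have h2 : (a : Int) ≤ ((a + m : Nat) : Int) := by push_cast; omega
    rw [h1, PySem.List.pyRange_one_succ_right h2, ih, List.range_succ]
    simp

-- the B inner scan returns the first matching window length
lemma pvBInner_eq (need : PySem.Set Char) (u : List Char) :
    ∀ (cur : PySem.Set Char) (len : Nat),
    pvBInner need cur u len
      = ((List.range u.length).find?
          (fun k => PySem.Set.equal (pvAddAll cur (u.take (k+1))) need)).map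
          (fun k => len + (k+1)) := by
  induction u with
  | nil => intro cur len; simp [pvBInner]
  | cons ch u' ih =>
    intro cur len
    by_cases hch : PySem.Set.contains need ch
    · simp only [pvBInner, hch, if_true]
      have htake : ∀ k : Nat, pvAddAll cur ((ch :: u').take (k+1))
          = pvAddAll (PySem.Set.add cur ch) (u'.take k) := by
        intro k; simp [pvAddAll]
      by_cases heq : PySem.Set.equal (PySem.Set.add cur ch) need
      · simp only [heq, if_true]
        have h0 : PySem.Set.equal (pvAddAll cur ((ch :: u').take (0+1))) need = true := by
          rw [htake 0]; simpa [pvAddAll] using heq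
        have hfind : List.find? (fun k => PySem.Set.equal (pvAddAll cur ((ch :: u').take (k+1))) need)
            (0 :: List.map Nat.succ (List.range u'.length)) = some 0 := List.find?_cons_of_pos h0
        rw [List.length_cons, List.range_succ_eq_map, hfind]
        simp
      · simp only [heq, if_false, ih]
        have h0 : ¬ PySem.Set.equal (pvAddAll cur ((ch :: u').take (0+1))) need = true := by
          rw [htake 0]; simpa [pvAddAll] using heq
        have hfind : List.find? (fun k => PySem.Set.equal (pvAddAll cur ((ch :: u').take (k+1))) need)
            (0 :: List.map Nat.succ (List.range u'.length))
            = List.find? (fun k => PySem.Set.equal (pvAddAll cur ((ch :: u').take (k+1))) need)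
              (List.map Nat.succ (List.range u'.length)) := List.find?_cons_of_neg h0
        rw [List.length_cons, List.range_succ_eq_map, hfind, List.find?_map]
        have hfun : ((fun k => PySem.Set.equal (pvAddAll cur ((ch :: u').take (k+1))) need) ∘ Nat.succ)
            = (fun k => PySem.Set.equal (pvAddAll (PySem.Set.add cur ch) (u'.take (k+1))) need) := by
          funext k
          simp only [Function.comp_apply, Nat.succ_eq_add_one]
          rw [htake (k+1)]
        rw [hfun, Option.map_map]
        simp only [Bool.false_eq_true, if_false]
        congr 1
        funext k
        simp only [Function.comp_apply]
        omega
    · simp only [pvBInner, hch, if_false]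
      have hnone : ∀ k ∈ List.range (ch :: u').length,
          ¬ (PySem.Set.equal (pvAddAll cur ((ch :: u').take (k+1))) need = true) := by
        intro k _ hcontra
        have hmem : ch ∈ pvAddAll cur ((ch :: u').take (k+1)) := by
          simp only [pvAddAll, List.take_succ_cons, List.foldl_cons]
          exact (PySem.Set.mem_foldl_add (List.take k u') id _ ch).mpr
            (Or.inl ((PySem.Set.mem_add cur ch ch).mpr (Or.inr rfl)))
        have := (PySem.Set.equal_iff _ _).mp hcontra ch
        exact hch (by rw [PySem.Set.contains_iff]; exact this.mp hmem)
      rw [List.find?_eq_none.mpr (by intro k hk; simpa using hnone k hk)]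
      simp

-- a min-accumulating fold over range m equals min with the first match
lemma pvFoldlMinFind (q : Nat → Bool) (m : Nat) (sh : Int) :
    (List.range m).foldl
      (fun sh k => if q k then (if (k:Int) < sh then (k:Int) else sh) else sh) sh
      = match (List.range m).find? q with
        | none => sh
        | some k0 => min sh (k0:Int) := by
  induction m with
  | zero => simp
  | succ m ih =>
    rw [List.range_succ, List.foldl_append, List.find?_append, ih]
    cases hf : (List.range m).find? q with
    | none =>
      simp only [List.foldl_cons, List.foldl_nil, Option.none_or]
      cases hq : q m with
      | false => simp [hq]
      | true =>
        simp only [hq, if_true, List.find?_cons]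
        split <;> simp_all <;> omega
    | some k0 =>
      have hk0 : k0 < m := List.mem_range.mp (List.mem_of_find?_eq_some hf)
      simp only [List.foldl_cons, List.foldl_nil, Option.some_or]
      cases hq : q m with
      | false => simp [hq]
      | true =>
        simp only [if_true]
        have hle : min sh (k0:Int) ≤ (k0:Int) := min_le_right _ _
        have hlt : ¬ ((m:Int) < min sh (k0:Int)) := by omega
        simp [hlt]

-- A's inner loop at start i, expressed through the first matching end j = i + k
lemma pvInnerA_find (t : List Char) (need : PySem.Set Char) (i : Nat) (hi : i ≤ t.length)
    (sh : Int) :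
    (PySem.List.pyRange (i:Int) ((t.length:Int) + 1) 1).foldl
      (fun sh j => if PySem.Set.equal (PySem.Set.ofList (PySem.List.slice t (some (i:Int)) (some j))) need
          then (if j - (i:Int) < sh then j - (i:Int) else sh) else sh) sh
      = match (List.range ((t.drop i).length + 1)).find?
            (fun k => PySem.Set.equal (PySem.Set.ofList ((t.drop i).take k)) need) with
        | none => sh
        | some k0 => min sh (k0:Int) := by
  have hm : (t.length : Int) + 1 = ((i + ((t.drop i).length + 1) : Nat) : Int) := by
    simp only [List.length_drop]; push_cast; omega
  rw [hm, pvRange_cast i ((t.drop i).length + 1), List.foldl_map]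
  have hstep : (fun (sh : Int) (k : Nat) =>
        if PySem.Set.equal (PySem.Set.ofList (PySem.List.slice t (some (i:Int)) (some ((i + k : Nat):Int)))) need
          then (if ((i + k : Nat):Int) - (i:Int) < sh then ((i + k : Nat):Int) - (i:Int) else sh) else sh)
      = (fun (sh : Int) (k : Nat) =>
        if (fun k => PySem.Set.equal (PySem.Set.ofList ((t.drop i).take k)) need) k
          then (if (k:Int) < sh then (k:Int) else sh) else sh) := by
    funext sh k
    have hslice : PySem.List.slice t (some (i:Int)) (some ((i + k : Nat):Int)) = (t.drop i).take k := by
      simp [pysem]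
    have hsub : ((i + k : Nat) : Int) - (i:Int) = (k:Int) := by push_cast; ring
    rw [hslice, hsub]
  rw [hstep]
  exact pvFoldlMinFind _ _ sh

-- when need is nonempty, A's first matching end agrees with B's inner scan
lemma pvFind_shift (need : PySem.Set Char) (hne : need ≠ []) (u : List Char) :
    (List.range (u.length + 1)).find?
        (fun k => PySem.Set.equal (PySem.Set.ofList (u.take k)) need)
      = ((List.range u.length).find?
          (fun k => PySem.Set.equal (pvAddAll [] (u.take (k+1))) need)).map (· + 1) := by
  have h0 : ¬ PySem.Set.equal (PySem.Set.ofList (u.take 0)) need = true := by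
    intro h
    apply hne
    have hmem := (PySem.Set.equal_iff _ _).mp h
    refine List.eq_nil_iff_forall_not_mem.mpr ?_
    intro x hx
    have : x ∈ PySem.Set.ofList (u.take 0) := (hmem x).mpr hx
    simp [PySem.Set.ofList] at this
  rw [List.range_succ_eq_map]
  have hfind : List.find? (fun k => PySem.Set.equal (PySem.Set.ofList (u.take k)) need)
      (0 :: List.map Nat.succ (List.range u.length))
      = List.find? (fun k => PySem.Set.equal (PySem.Set.ofList (u.take k)) need)
        (List.map Nat.succ (List.range u.length)) := List.find?_cons_of_neg h0
  rw [hfind, List.find?_map]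
  have hfun : ((fun k => PySem.Set.equal (PySem.Set.ofList (u.take k)) need) ∘ Nat.succ)
      = (fun k => PySem.Set.equal (pvAddAll [] (u.take (k+1))) need) := by
    funext k
    simp only [Function.comp_apply, Nat.succ_eq_add_one, pvAddAll, PySem.Set.ofList_eq_foldl]
  rw [hfun]

-- A's inner loop = min with B's inner scan (need nonempty)
lemma pvInnerAB (t : List Char) (need : PySem.Set Char) (hne : need ≠ []) (i : Nat)
    (hi : i ≤ t.length) (sh : Int) :
    (PySem.List.pyRange (i:Int) ((t.length:Int) + 1) 1).foldl
      (fun sh j => if PySem.Set.equal (PySem.Set.ofList (PySem.List.slice t (some (i:Int)) (some j))) need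
          then (if j - (i:Int) < sh then j - (i:Int) else sh) else sh) sh
      = match pvBInner need PySem.Set.empty (t.drop i) 0 with
        | none => sh
        | some d => min sh (d:Int) := by
  rw [pvInnerA_find t need i hi sh, pvFind_shift need hne (t.drop i)]
  have hcur : (PySem.Set.empty : PySem.Set Char) = ([] : PySem.Set Char) := rfl
  rw [pvBInner_eq need (t.drop i) PySem.Set.empty 0, hcur]
  cases hf : (List.range (t.drop i).length).find?
      (fun k => PySem.Set.equal (pvAddAll [] ((t.drop i).take (k+1))) need) with
  | none => simp
  | some k => simp

lemma pvBInner_le (need : PySem.Set Char) (u : List Char) (d : Nat)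
    (h : pvBInner need PySem.Set.empty u 0 = some d) : d ≤ u.length := by
  rw [pvBInner_eq need u PySem.Set.empty 0] at h
  cases hf : (List.range u.length).find?
      (fun k => PySem.Set.equal (pvAddAll PySem.Set.empty (u.take (k+1))) need) with
  | none => rw [hf] at h; simp at h
  | some k =>
    rw [hf] at h
    have hk : k < u.length := List.mem_range.mp (List.mem_of_find?_eq_some hf)
    simp at h
    omega

-- outer loops agree (need nonempty): A's Int accumulator mirrors B's Option
lemma pvOuterAB (t : List Char) (need : PySem.Set Char) (hne : need ≠ []) :
    ∀ (L : List Nat), (∀ i ∈ L, i < t.length) →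
    ∀ (best : Option Nat), (∀ d, best = some d → d ≤ t.length) →
    ((L.map (fun (i : Nat) => ((i : Nat) : Int))).foldl (fun sh i =>
        (PySem.List.pyRange i ((t.length:Int) + 1) 1).foldl
          (fun sh j => if PySem.Set.equal (PySem.Set.ofList (PySem.List.slice t (some i) (some j))) need
              then (if j - i < sh then j - i else sh) else sh) sh)
        (match best with | none => (t.length:Int) + 1 | some d => (d:Int))
      = (match (L.foldl (fun best i =>
            match pvBInner need PySem.Set.empty (t.drop i) 0 with
            | none => best
            | some d => match best with
              | none => some d
              | some b => if d < b then some d else best) best) with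
          | none => (t.length:Int) + 1 | some d => (d:Int)))
    ∧ (∀ d, (L.foldl (fun best i =>
            match pvBInner need PySem.Set.empty (t.drop i) 0 with
            | none => best
            | some d => match best with
              | none => some d
              | some b => if d < b then some d else best) best) = some d → d ≤ t.length) := by
  intro L
  induction L with
  | nil => intro _ best hb; exact ⟨rfl, hb⟩
  | cons i L' ih =>
    intro hL best hb
    have hi : i < t.length := hL i (List.mem_cons_self ..)
    have hL' : ∀ j ∈ L', j < t.length := fun j hj => hL j (List.mem_cons_of_mem _ hj)
    simp only [List.map_cons, List.foldl_cons]
    rw [pvInnerAB t need hne i (le_of_lt hi)]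
    cases hbi : pvBInner need PySem.Set.empty (t.drop i) 0 with
    | none => exact ih hL' best hb
    | some dl =>
      have hdl : dl ≤ t.length := le_trans (pvBInner_le need (t.drop i) dl hbi) (by simp)
      cases best with
      | none =>
        dsimp only
        have hrepr : min ((t.length:Int) + 1) (dl:Int) = ((dl:Int)) := by omega
        rw [hrepr]
        exact ih hL' (some dl) (by intro d hd; cases hd; exact hdl)
      | some bd =>
        have hbd : bd ≤ t.length := hb bd rfl
        dsimp only
        by_cases hlt : dl < bd
        · have hrepr : min ((bd:Nat):Int) (dl:Int) = ((dl:Int)) := by omega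
          rw [hrepr]
          have := ih hL' (some dl) (by intro d hd; cases hd; exact hdl)
          simpa [hlt] using this
        · have hrepr : min ((bd:Nat):Int) (dl:Int) = ((bd:Nat):Int) := by omega
          rw [hrepr]
          have := ih hL' (some bd) (by intro d hd; cases hd; exact hbd)
          simpa [hlt] using this

-- with an empty target set, A's inner loop always matches the empty substring
lemma pvAfold_empty (t : List Char) :
    ∀ (L : List Nat), (∀ i ∈ L, i < t.length) → ∀ sh : Int, 0 ≤ sh →
    ((L.map (fun (i : Nat) => ((i : Nat) : Int))).foldl (fun sh i =>
        (PySem.List.pyRange i ((t.length:Int) + 1) 1).foldl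
          (fun sh j => if PySem.Set.equal (PySem.Set.ofList (PySem.List.slice t (some i) (some j))) ([] : PySem.Set Char)
              then (if j - i < sh then j - i else sh) else sh) sh) sh)
      = if L.isEmpty then sh else 0 := by
  intro L
  induction L with
  | nil => intro _ sh _; simp
  | cons i L' ih =>
    intro hL sh hsh
    have hi : i < t.length := hL i (List.mem_cons_self ..)
    have hL' : ∀ j ∈ L', j < t.length := fun j hj => hL j (List.mem_cons_of_mem _ hj)
    simp only [List.map_cons, List.foldl_cons]
    rw [pvInnerA_find t ([] : PySem.Set Char) i (le_of_lt hi) sh]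
    have h0 : PySem.Set.equal (PySem.Set.ofList ((t.drop i).take 0)) ([] : PySem.Set Char) = true := by
      refine (PySem.Set.equal_iff _ _).mpr ?_
      intro x; simp [PySem.Set.ofList]
    have hfind : (List.range ((t.drop i).length + 1)).find?
        (fun k => PySem.Set.equal (PySem.Set.ofList ((t.drop i).take k)) ([] : PySem.Set Char)) = some 0 := by
      rw [List.range_succ_eq_map]
      exact List.find?_cons_of_pos h0
    rw [hfind]
    dsimp only
    have hmin : min sh ((0:Nat):Int) = 0 := by omega
    rw [hmin]
    rw [ih hL' 0 le_rfl]
    cases L' <;> simp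

-- ===== VERDICT (by name: the statement is the Claim_ definition above) =====
theorem find_minimal_substring_spec : Claim_equal_find_minimal_substring := by
  intro s c _
  unfold Spec_find_minimal_substring
  simp only [find_minimal_substring, find_minimal_substring_alt]
  set t := s.toList with ht
  set need := PySem.Set.ofList c.toList with hneed
  by_cases hemp : need.isEmpty
  · -- need = []: both sides return 0
    have hne : need = [] := by simpa [List.isEmpty_iff] using hemp
    rw [hne]
    simp only [List.isEmpty_nil, if_true]
    rw [PySem.List.pyRange_zero_natCast]
    rw [pvAfold_empty t (List.range t.length) (by simp) ((t.length:Int) + 1) (by positivity)]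
    by_cases h0 : t.length = 0
    · simp [h0]
    · have hie : (List.range t.length).isEmpty = false := by
        simp [List.isEmpty_iff, List.range_eq_nil, h0]
      rw [hie]
      have hcond : (0:Int) ≠ (t.length:Int) + 1 := by omega
      simp [hcond]
  · have hne : need ≠ [] := by simpa [List.isEmpty_iff] using hemp
    simp only [hemp, if_false]
    rw [PySem.List.pyRange_zero_natCast]
    obtain ⟨hfold, hbound⟩ := pvOuterAB t need hne (List.range t.length) (by simp) none (by simp)
    dsimp only at hfold
    rw [hfold]
    cases hF : (List.range t.length).foldl (fun best i =>
        match pvBInner need PySem.Set.empty (t.drop i) 0 with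
        | none => best
        | some d => match best with
          | none => some d
          | some b => if d < b then some d else best) none with
    | none => simp
    | some d =>
      have hd : d ≤ t.length := hbound d hF
      have hcond : ((d:Nat):Int) ≠ (t.length:Int) + 1 := by omega
      simp [hcond]
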